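-- pv_equiv track=rewrite | github.com/focuscw0w/Don-t-Get-Angry | main.py | najdi_poziciu_hraca
-- ===== SOURCE A (Python) =====
-- def najdi_poziciu_hraca(sachovnica, hrac):
--     suradnice = ["", ""]
--     for i in range(len(sachovnica)):
--         riadok = sachovnica[i]
--         if hrac in riadok:
--             suradnice[0] = i
--             suradnice[1] = riadok.index(hrac)
--     return suradnice
-- ===== SOURCE B (Python) =====
-- def najdi_poziciu_hraca(sachovnica, hrac):
--     for i in range(len(sachovnica) - 1, -1, -1):
--         riadok = sachovnica[i]
--         if hrac in riadok:
--             return [i, riadok.index(hrac)]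
--     return ["", ""]
-- ===== Notes on version B (the rewrite author's own statement) =====
-- stated objective: idiomatic
-- what changed: B scans rows from the bottom up and returns immediately at the first (i.e. last overall) matching row, instead of A's full top-down scan that overwrites the result on every match.
-- outside the precondition, e.g. on najdi_poziciu_hraca([[1, 2], [3]], 9): A returns ['', ''], B returns ['', '']
import Mathlib
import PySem

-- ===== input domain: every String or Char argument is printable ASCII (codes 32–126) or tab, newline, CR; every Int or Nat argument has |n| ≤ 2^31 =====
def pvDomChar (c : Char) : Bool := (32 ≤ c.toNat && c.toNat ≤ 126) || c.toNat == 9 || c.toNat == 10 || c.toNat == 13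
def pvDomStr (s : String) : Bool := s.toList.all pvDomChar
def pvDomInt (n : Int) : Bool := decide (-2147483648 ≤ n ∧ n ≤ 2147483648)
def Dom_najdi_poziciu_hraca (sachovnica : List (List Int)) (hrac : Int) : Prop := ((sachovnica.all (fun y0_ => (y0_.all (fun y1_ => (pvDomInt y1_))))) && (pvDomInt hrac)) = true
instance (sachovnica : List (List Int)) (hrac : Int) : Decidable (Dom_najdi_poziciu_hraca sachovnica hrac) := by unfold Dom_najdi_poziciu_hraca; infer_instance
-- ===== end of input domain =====

-- B scans from the last row upward and returns at the first match (= A's last match); idiomatic early-exit rewrite, same cost.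
-- ===== PORT A =====
-- A's loop state `suradnice` starts as ["",""] (two strings) and holds [int,int] after the first
-- match; under Pre_ (player present) the final value is the int pair. We represent the state as
-- Option (Int × Int): none = the untouched ["",""] (not an Int value, excluded by Pre_).
def najdi_poziciu_hraca (sachovnica : List (List Int)) (hrac : Int) : List Int :=
  let st := (List.range sachovnica.length).foldl (fun acc i =>
    let riadok := sachovnica.getD i []
    if hrac ∈ riadok then some ((i : Int), (((PySem.List.index? riadok hrac).getD 0 : Nat) : Int))
    else acc) none
  match st with
  | some (a, b) => [a, b]
  | none => []  -- corresponds to Python's ["",""]; outside Pre_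

-- ===== PORT B =====
-- Source B: for i in range(len-1, -1, -1): if hrac in sachovnica[i]: return [i, row.index(hrac)]
def najdi_poziciu_hraca_altGo (sachovnica : List (List Int)) (hrac : Int) : Nat → List Int
  | 0 => []  -- loop exhausted: Python's ["",""]; outside Pre_
  | n + 1 =>
    let riadok := sachovnica.getD n []
    if hrac ∈ riadok then [(n : Int), (((PySem.List.index? riadok hrac).getD 0 : Nat) : Int)]
    else najdi_poziciu_hraca_altGo sachovnica hrac n

def najdi_poziciu_hraca_alt (sachovnica : List (List Int)) (hrac : Int) : List Int :=
  najdi_poziciu_hraca_altGo sachovnica hrac sachovnica.length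

-- ===== PRECONDITION & SPEC =====
-- Pre_ excludes inputs where the player occurs in no row: there Python A returns ["", ""] — two
-- strings, not a value of the declared List Int type.
def Pre_najdi_poziciu_hraca (sachovnica : List (List Int)) (hrac : Int) : Prop :=
  ∃ riadok ∈ sachovnica, hrac ∈ riadok
instance (sachovnica : List (List Int)) (hrac : Int) : Decidable (Pre_najdi_poziciu_hraca sachovnica hrac) := by unfold Pre_najdi_poziciu_hraca; infer_instance

def pvWitness_najdi_poziciu_hraca : List (List Int) × Int := ([[1, 2], [3, 2]], 2)

def Spec_najdi_poziciu_hraca (sachovnica : List (List Int)) (hrac : Int) (out : List Int) : Prop := out = najdi_poziciu_hraca_alt sachovnica hrac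
instance (sachovnica : List (List Int)) (hrac : Int) (out : List Int) : Decidable (Spec_najdi_poziciu_hraca sachovnica hrac out) := by unfold Spec_najdi_poziciu_hraca; infer_instance

-- ===== CLAIM (what is proved, stated in full; the proofs are below) =====
def Claim_equal_najdi_poziciu_hraca : Prop := ∀ (sachovnica : List (List Int)) (hrac : Int), Dom_najdi_poziciu_hraca sachovnica hrac → Pre_najdi_poziciu_hraca sachovnica hrac → Spec_najdi_poziciu_hraca sachovnica hrac (najdi_poziciu_hraca sachovnica hrac)

-- ===== LEMMAS AND PROOFS =====
-- The key invariant: after scanning the first n rows, A's overwrite state rendered as a list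
-- equals B's bottom-up scan of those same n rows.
theorem najdi_poziciu_hraca_loop_eq (sachovnica : List (List Int)) (hrac : Int) (n : Nat) :
    (match (List.range n).foldl (fun acc i =>
        let riadok := sachovnica.getD i []
        if hrac ∈ riadok then some ((i : Int), (((PySem.List.index? riadok hrac).getD 0 : Nat) : Int))
        else acc) none with
      | some (a, b) => [a, b]
      | none => ([] : List Int)) = najdi_poziciu_hraca_altGo sachovnica hrac n := by
  induction n with
  | zero => simp [najdi_poziciu_hraca_altGo]
  | succ n ih =>
    rw [List.range_succ, List.foldl_append]
    simp only [List.foldl_cons, List.foldl_nil, najdi_poziciu_hraca_altGo]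
    split_ifs with h
    · simp
    · exact ih

-- ===== VERDICT (by name: the statement is the Claim_ definition above) =====
theorem najdi_poziciu_hraca_spec : Claim_equal_najdi_poziciu_hraca := by
  intro sachovnica hrac _ _
  unfold Spec_najdi_poziciu_hraca najdi_poziciu_hraca najdi_poziciu_hraca_alt
  exact najdi_poziciu_hraca_loop_eq sachovnica hrac sachovnica.length
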